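-- pv_equiv track=rewrite | github.com/Silenttttttt/fin-esp-rs | tools/png_to_lcd_glyphs.py | transform_glyph_rows
-- ===== SOURCE A (Python) =====
-- def mirror_row5(b: int) -> int:
--     """Mirror one row left↔right (HD44780: bit 4 = left)."""
--     b &= 0x1F
--     return int(f"{b:05b}"[::-1], 2)
--
-- def transform_glyph_rows(rows: list[int], mirror_h: bool, mirror_v: bool, invert_bits: bool) -> list[int]:
--     out = [(r & 0x1F) for r in rows]
--     if mirror_h:
--         out = [mirror_row5(r) for r in out]
--     if mirror_v:
--         out = out[::-1]
--     if invert_bits: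
--         out = [r ^ 0x1F for r in out]
--     return out
-- ===== SOURCE B (Python) =====
-- def transform_glyph_rows(rows: list[int], mirror_h: bool, mirror_v: bool, invert_bits: bool) -> list[int]:
--     # Precompute the whole 5-bit transform as a 32-entry lookup table, then
--     # apply it by index traversal (reversed index range when mirror_v).
--     table = []
--     for v in range(32):
--         t = (((v >> 4) & 1) | (((v >> 3) & 1) << 1) | (((v >> 2) & 1) << 2)
--              | (((v >> 1) & 1) << 3) | ((v & 1) << 4)) if mirror_h else v
--         if invert_bits:
--             t ^= 0x1F
--         table.append(t)
--     idx = range(len(rows) - 1, -1, -1) if mirror_v else range(len(rows))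
--     return [table[rows[i] & 0x1F] for i in idx]
-- ===== Notes on version B (the rewrite author's own statement) =====
-- stated objective: alternative
-- what changed: Instead of A's four staged per-row list passes (mask, per-row string-format bit mirror, slice reversal, invert), B precomputes a 32-entry lookup table encoding the whole per-row transform once and produces the output by a single indexed traversal (a reversed index range for mirror_v), reducing each row to one table lookup.
import Mathlib
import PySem

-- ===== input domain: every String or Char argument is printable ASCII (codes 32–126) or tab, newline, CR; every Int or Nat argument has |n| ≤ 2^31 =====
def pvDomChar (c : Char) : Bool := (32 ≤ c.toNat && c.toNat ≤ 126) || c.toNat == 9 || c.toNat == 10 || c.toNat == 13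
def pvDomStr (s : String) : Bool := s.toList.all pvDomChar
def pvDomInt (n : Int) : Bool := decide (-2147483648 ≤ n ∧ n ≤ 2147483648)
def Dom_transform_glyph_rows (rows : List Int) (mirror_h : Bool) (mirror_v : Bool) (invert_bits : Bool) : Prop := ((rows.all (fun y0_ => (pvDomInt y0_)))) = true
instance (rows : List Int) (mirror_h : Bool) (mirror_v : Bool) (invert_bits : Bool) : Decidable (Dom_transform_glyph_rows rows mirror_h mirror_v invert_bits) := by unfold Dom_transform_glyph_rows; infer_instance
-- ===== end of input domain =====

-- B replaces A's four staged per-row passes by a precomputed 32-entry lookup table applied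
-- through a single indexed traversal (reversed index range for mirror_v); objective: alternative.


-- ===== PORT A =====
-- f"{b:05b}" is ported by hand as the list of b's five binary digits MSB-first; this is exact
-- because b has just been masked to 0 ≤ b < 32.  "[::-1]" is List.reverse, int(·, 2) is the
-- standard base-2 fold over the digits.
def mirror_row5 (b : Int) : Int :=
  let b := PySem.Int.band b 31
  let digits : List Int :=
    [PySem.Int.band (b >>> 4) 1, PySem.Int.band (b >>> 3) 1, PySem.Int.band (b >>> 2) 1,
     PySem.Int.band (b >>> 1) 1, PySem.Int.band b 1]
  digits.reverse.foldl (fun acc d => 2 * acc + d) 0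

def transform_glyph_rows (rows : List Int) (mirror_h : Bool) (mirror_v : Bool) (invert_bits : Bool) : List Int :=
  let out := rows.map (fun r => PySem.Int.band r 31)
  let out := if mirror_h then out.map mirror_row5 else out
  let out := if mirror_v then out.reverse else out  -- out[::-1]
  if invert_bits then out.map (fun r => PySem.Int.bxor r 31) else out

-- ===== PORT B =====
-- table[...] and rows[i] are indexed with pyGetD; both indices are provably in range
-- (0 ≤ r & 31 < 32 = len table; i drawn from range(len rows)), so the default is never taken.
def transform_glyph_rows_alt (rows : List Int) (mirror_h : Bool) (mirror_v : Bool) (invert_bits : Bool) : List Int :=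
  let table := (PySem.List.pyRange 0 32 1).foldl (fun (table : List Int) (v : Int) =>
    let t := if mirror_h then
        PySem.Int.bor (PySem.Int.bor (PySem.Int.bor (PySem.Int.bor
          (PySem.Int.band (v >>> 4) 1) ((PySem.Int.band (v >>> 3) 1) <<< 1))
          ((PySem.Int.band (v >>> 2) 1) <<< 2)) ((PySem.Int.band (v >>> 1) 1) <<< 3))
          ((PySem.Int.band v 1) <<< 4)
      else v
    let t := if invert_bits then PySem.Int.bxor t 31 else t
    table ++ [t]) []
  let idx := if mirror_v then PySem.List.pyRange ((rows.length : Int) - 1) (-1) (-1)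
             else PySem.List.pyRange 0 (rows.length : Int) 1
  idx.map (fun i => PySem.List.pyGetD table (PySem.Int.band (PySem.List.pyGetD rows i 0) 31) 0)

-- ===== PRECONDITION & SPEC =====
def Spec_transform_glyph_rows (rows : List Int) (mirror_h : Bool) (mirror_v : Bool) (invert_bits : Bool) (out : List Int) : Prop := out = transform_glyph_rows_alt rows mirror_h mirror_v invert_bits
instance (rows : List Int) (mirror_h : Bool) (mirror_v : Bool) (invert_bits : Bool) (out : List Int) : Decidable (Spec_transform_glyph_rows rows mirror_h mirror_v invert_bits out) := by unfold Spec_transform_glyph_rows; infer_instance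

-- ===== CLAIM (what is proved, stated in full; the proofs are below) =====
def Claim_equal_transform_glyph_rows : Prop := ∀ (rows : List Int) (mirror_h : Bool) (mirror_v : Bool) (invert_bits : Bool), Dom_transform_glyph_rows rows mirror_h mirror_v invert_bits → Spec_transform_glyph_rows rows mirror_h mirror_v invert_bits (transform_glyph_rows rows mirror_h mirror_v invert_bits)

-- ===== LEMMAS AND PROOFS =====

-- B's lookup table, named for the proof (definitionally the `table` built inside the port).
def pvTable (mirror_h invert_bits : Bool) : List Int :=
  (PySem.List.pyRange 0 32 1).foldl (fun (table : List Int) (v : Int) =>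
    let t := if mirror_h then
        PySem.Int.bor (PySem.Int.bor (PySem.Int.bor (PySem.Int.bor
          (PySem.Int.band (v >>> 4) 1) ((PySem.Int.band (v >>> 3) 1) <<< 1))
          ((PySem.Int.band (v >>> 2) 1) <<< 2)) ((PySem.Int.band (v >>> 1) 1) <<< 3))
          ((PySem.Int.band v 1) <<< 4)
      else v
    let t := if invert_bits then PySem.Int.bxor t 31 else t
    table ++ [t]) []

-- A's composed per-row transform.
def pvAStep (mh inv : Bool) (v : Int) : Int :=
  (fun x => if inv then PySem.Int.bxor x 31 else x)
    ((fun x => if mh then mirror_row5 x else x) v)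

theorem pv_band31_bounds (r : Int) : 0 ≤ PySem.Int.band r 31 ∧ PySem.Int.band r 31 < 32 := by
  unfold PySem.Int.band
  have h1 : r.toNat &&& (31:Int).toNat ≤ 31 := Nat.and_le_right
  have h2 : (31:Int).toNat &&& (-r - 1).toNat ≤ 31 := Nat.and_le_left
  split_ifs with ha hb hb <;> norm_num at * <;> omega

-- The table agrees with A's composed transform on its whole index range.
theorem pv_table_lookup (mh inv : Bool) (v : Int) (h0 : 0 ≤ v) (h1 : v < 32) :
    PySem.List.pyGetD (pvTable mh inv) v 0 = pvAStep mh inv v := by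
  cases mh <;> cases inv <;> interval_cases v <;> decide

theorem pv_step_eq (mh inv : Bool) (r : Int) :
    PySem.List.pyGetD (pvTable mh inv) (PySem.Int.band r 31) 0 = pvAStep mh inv (PySem.Int.band r 31) :=
  pv_table_lookup mh inv _ (pv_band31_bounds r).1 (pv_band31_bounds r).2

-- Indexed traversal of rows by range(len(rows)) composed with g is rows.map g.
theorem pv_map_idx (rows : List Int) (g : Int → Int) :
    (PySem.List.pyRange 0 (rows.length : Int) 1).map (fun i => g (PySem.List.pyGetD rows i 0)) = rows.map g := by
  have h := PySem.List.map_pyGetD_pyRange_zero' rows 0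
  calc (PySem.List.pyRange 0 (rows.length : Int) 1).map (fun i => g (PySem.List.pyGetD rows i 0))
      = ((PySem.List.pyRange 0 (rows.length : Int) 1).map (fun i => PySem.List.pyGetD rows i 0)).map g := by
        rw [List.map_map]; rfl
    _ = rows.map g := by rw [h]

-- ===== VERDICT (by name: the statement is the Claim_ definition above) =====
theorem transform_glyph_rows_spec : Claim_equal_transform_glyph_rows := by
  intro rows mh mv inv _
  unfold Spec_transform_glyph_rows transform_glyph_rows transform_glyph_rows_alt
  show _ = (if mv then PySem.List.pyRange ((rows.length : Int) - 1) (-1) (-1)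
            else PySem.List.pyRange 0 (rows.length : Int) 1).map
      (fun i => PySem.List.pyGetD (pvTable mh inv) (PySem.Int.band (PySem.List.pyGetD rows i 0) 31) 0)
  have hrev : PySem.List.pyRange ((rows.length : Int) - 1) (-1) (-1)
      = (PySem.List.pyRange 0 (rows.length : Int) 1).reverse := by
    have := PySem.List.pyRange_neg_one_eq_reverse ((rows.length : Int) - 1) (-1)
    simpa using this
  have hmap := pv_map_idx rows
    (fun r => PySem.List.pyGetD (pvTable mh inv) (PySem.Int.band r 31) 0)
  cases mv <;> simp only [if_true, if_false, Bool.false_eq_true, hrev,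
      List.map_reverse, hmap] <;>
    · cases mh <;> cases inv <;>
        simp [List.map_map, Function.comp, pv_step_eq, pvAStep]
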